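-- pv_equiv track=rewrite | github.com/2g-XzenG/Claim-PT | pretraining/DataGenerator.py | get_cat
-- ===== SOURCE A (Python) =====
-- def get_cat(seq, diag2cat, proc2cat, drug2cat):
--     new_seq = []
--     for p in seq:
--         new_p = []
--         for v in p:
--             new_v = []
--             for c in v:
--                 if c in diag2cat :
--                     new_c = diag2cat[c]
--                 elif c in proc2cat:
--                     new_c = proc2cat[c]
--                 elif c in drug2cat:
--                     new_c = drug2cat[c]
--                 else:
--                     new_c = c[:5]
--                 new_v.append(new_c)
--             new_p.append(new_v)
--         new_seq.append(new_p)
--     return new_seq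
-- ===== SOURCE B (Python) =====
-- def _category(c, diag2cat, proc2cat, drug2cat):
--     if c in diag2cat:
--         return diag2cat[c]
--     if c in proc2cat:
--         return proc2cat[c]
--     if c in drug2cat:
--         return drug2cat[c]
--     return c[:5]
--
--
-- def get_cat(seq, diag2cat, proc2cat, drug2cat):
--     # Staged pipeline: record the nesting shape, flatten all codes, translate
--     # each DISTINCT code once through a memo table, then rebuild the nested
--     # structure by slicing the translated flat list with a running cursor.
--     shape = [[len(v) for v in p] for p in seq]
--     flat = [c for p in seq for v in p for c in v]
--     memo = {}
--     for c in flat: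
--         if c not in memo:
--             memo[c] = _category(c, diag2cat, proc2cat, drug2cat)
--     trans = [memo[c] for c in flat]
--     out, i = [], 0
--     for vlens in shape:
--         p = []
--         for n in vlens:
--             p.append(trans[i:i + n])
--             i += n
--         out.append(p)
--     return out
-- ===== Notes on version B (the rewrite author's own statement) =====
-- stated objective: alternative
-- what changed: Replaces A's triple-nested translate-in-place loops by a staged pipeline: record the nesting shape, flatten all codes, translate each DISTINCT code once through a memo table, and rebuild the nested structure by slicing the translated flat list with a running cursor over the shape.
import Mathlib
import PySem

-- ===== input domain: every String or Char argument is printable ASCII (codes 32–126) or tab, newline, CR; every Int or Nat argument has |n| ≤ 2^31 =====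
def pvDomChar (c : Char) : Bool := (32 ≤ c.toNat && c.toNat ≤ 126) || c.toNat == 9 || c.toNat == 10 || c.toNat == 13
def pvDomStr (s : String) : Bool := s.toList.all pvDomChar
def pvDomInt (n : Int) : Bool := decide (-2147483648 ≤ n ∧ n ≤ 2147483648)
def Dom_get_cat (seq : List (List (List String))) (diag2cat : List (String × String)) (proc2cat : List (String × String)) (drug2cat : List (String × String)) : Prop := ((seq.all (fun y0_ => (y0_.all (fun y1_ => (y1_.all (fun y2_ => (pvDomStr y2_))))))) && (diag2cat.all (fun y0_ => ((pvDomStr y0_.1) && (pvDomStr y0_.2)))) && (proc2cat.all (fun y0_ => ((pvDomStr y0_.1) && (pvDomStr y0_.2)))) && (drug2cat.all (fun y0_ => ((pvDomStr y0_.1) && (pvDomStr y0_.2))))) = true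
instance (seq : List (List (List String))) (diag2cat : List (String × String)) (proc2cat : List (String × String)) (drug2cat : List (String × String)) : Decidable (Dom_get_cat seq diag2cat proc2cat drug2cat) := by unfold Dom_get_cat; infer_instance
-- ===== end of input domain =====

-- B flattens the nested codes, translates each distinct code once through a memo table,
-- and rebuilds the nesting by slicing the flat result with a running cursor over the recorded shape (objective: alternative).


-- ===== PORT A =====
-- A's elif chain; dict[c] is ported as getD (the default is unreachable under the contains guard)
def pyLookup3 (diag2cat proc2cat drug2cat : List (String × String)) (c : String) : String :=
  if (PySem.Dict.mk diag2cat).contains c then (PySem.Dict.mk diag2cat).getD c c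
  else if (PySem.Dict.mk proc2cat).contains c then (PySem.Dict.mk proc2cat).getD c c
  else if (PySem.Dict.mk drug2cat).contains c then (PySem.Dict.mk drug2cat).getD c c
  else PySem.Str.slice c none (some 5)

def get_cat (seq : List (List (List String))) (diag2cat : List (String × String)) (proc2cat : List (String × String)) (drug2cat : List (String × String)) : List (List (List String)) :=
  seq.foldl (fun new_seq p =>
    new_seq ++ [p.foldl (fun new_p v =>
      new_p ++ [v.foldl (fun new_v c =>
        new_v ++ [pyLookup3 diag2cat proc2cat drug2cat c]) []]) []]) []

-- ===== PORT B =====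
-- B's _category helper (early-return chain)
def bCategory (c : String) (diag2cat proc2cat drug2cat : List (String × String)) : String :=
  if (PySem.Dict.mk diag2cat).contains c then (PySem.Dict.mk diag2cat).getD c c
  else if (PySem.Dict.mk proc2cat).contains c then (PySem.Dict.mk proc2cat).getD c c
  else if (PySem.Dict.mk drug2cat).contains c then (PySem.Dict.mk drug2cat).getD c c
  else PySem.Str.slice c none (some 5)

def get_cat_alt (seq : List (List (List String))) (diag2cat : List (String × String)) (proc2cat : List (String × String)) (drug2cat : List (String × String)) : List (List (List String)) :=
  let shape := seq.map (fun p => p.map (fun v => v.length))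
  let flat := seq.flatMap (fun p => p.flatMap (fun v => v))
  let memo := flat.foldl (fun memo c =>
    if memo.contains c then memo
    else memo.insert c (bCategory c diag2cat proc2cat drug2cat)) PySem.Dict.empty
  -- memo[c] with c drawn from flat: every such key was inserted, KeyError impossible
  let trans := flat.map (fun c => memo.getD c c)
  -- trans[i:i+n] with 0 ≤ i and 0 ≤ n is exactly (trans.drop i).take n
  (shape.foldl (fun st vlens =>
      let r := vlens.foldl
        (fun sp n => (sp.1 ++ [(trans.drop sp.2).take n], sp.2 + n))
        (([] : List (List String)), st.2)
      (st.1 ++ [r.1], r.2))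
    (([] : List (List (List String))), 0)).1

-- ===== PRECONDITION & SPEC =====
def Spec_get_cat (seq : List (List (List String))) (diag2cat : List (String × String)) (proc2cat : List (String × String)) (drug2cat : List (String × String)) (out : List (List (List String))) : Prop := out = get_cat_alt seq diag2cat proc2cat drug2cat
instance (seq : List (List (List String))) (diag2cat : List (String × String)) (proc2cat : List (String × String)) (drug2cat : List (String × String)) (out : List (List (List String))) : Decidable (Spec_get_cat seq diag2cat proc2cat drug2cat out) := by unfold Spec_get_cat; infer_instance

-- ===== CLAIM (what is proved, stated in full; the proofs are below) =====
def Claim_equal_get_cat : Prop := ∀ (seq : List (List (List String))) (diag2cat : List (String × String)) (proc2cat : List (String × String)) (drug2cat : List (String × String)), Dom_get_cat seq diag2cat proc2cat drug2cat → Spec_get_cat seq diag2cat proc2cat drug2cat (get_cat seq diag2cat proc2cat drug2cat)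

-- ===== LEMMAS AND PROOFS =====

-- the memo fold: if every value already stored is f of its key, then after the fold
-- every code of l (and every key already present) maps to f of itself
theorem memo_get (f : String → String) (l : List String) (m : PySem.Dict String String)
    (hinv : ∀ k v, m.get? k = some v → v = f k) (c : String)
    (hc : c ∈ l ∨ m.contains c = true) :
    (l.foldl (fun m c => if m.contains c then m else m.insert c (f c)) m).get? c = some (f c) := by
  induction l generalizing m with
  | nil =>
    rcases hc with h | h
    · cases h
    · simp only [List.foldl_nil]
      rw [PySem.Dict.contains_eq_isSome_get?] at h
      obtain ⟨v, hv⟩ := Option.isSome_iff_exists.mp h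
      rw [hv, hinv c v hv]
  | cons a l ih =>
    simp only [List.foldl_cons]
    by_cases ha : m.contains a = true
    · simp only [ha, if_true]
      apply ih m hinv
      rcases hc with h | h
      · rcases List.mem_cons.mp h with rfl | h'
        · exact Or.inr ha
        · exact Or.inl h'
      · exact Or.inr h
    · rw [if_neg ha]
      apply ih
      · intro k v hk
        rw [PySem.Dict.get?_insert] at hk
        split_ifs at hk with hek
        · subst hek; exact (Option.some.injEq _ _).mp hk |>.symm ▸ rfl
        · exact hinv k v hk
      · rcases hc with h | h
        · rcases List.mem_cons.mp h with rfl | h'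
          · exact Or.inr (PySem.Dict.contains_insert_self _ _ _)
          · exact Or.inl h'
        · refine Or.inr ?_
          rw [PySem.Dict.contains_insert]
          simp [h]

-- the inner cursor loop slices one page's rows back out of the flat translated list
theorem row_fold (f : String → String) (trans : List String) (p : List (List String))
    (acc : List (List String)) (done rest : List String)
    (ht : trans = done ++ p.flatMap (fun v => v.map f) ++ rest) :
    (p.map List.length).foldl
        (fun sp n => (sp.1 ++ [(trans.drop sp.2).take n], sp.2 + n)) (acc, done.length)
      = (acc ++ p.map (fun v => v.map f),
         done.length + (p.flatMap (fun v => v.map f)).length) := by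
  induction p generalizing acc done with
  | nil => simp
  | cons v p ih =>
    have hdrop : trans.drop done.length
        = v.map f ++ (p.flatMap (fun v => v.map f) ++ rest) := by
      rw [ht]; simp
    have htake : (trans.drop done.length).take v.length = v.map f := by
      rw [hdrop, show v.length = (v.map f).length from (List.length_map ..).symm,
          List.take_left]
    simp only [List.map_cons, List.foldl_cons, htake]
    have hlen : done.length + v.length = (done ++ v.map f).length := by
      simp
    rw [hlen, ih (acc ++ [v.map f]) (done ++ v.map f)
          (by rw [ht]; simp [List.append_assoc])]
    simp only [List.flatMap_cons, Prod.mk.injEq]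
    constructor
    · simp
    · simp; omega

-- the outer cursor loop rebuilds the whole nesting from the shape
theorem outer_fold (f : String → String) (trans : List String)
    (seq : List (List (List String))) (acc : List (List (List String)))
    (done rest : List String)
    (ht : trans = done ++ seq.flatMap (fun p => p.flatMap (fun v => v.map f)) ++ rest) :
    (seq.map (fun p => p.map (fun v => v.length))).foldl
        (fun st vlens =>
          let r := vlens.foldl
            (fun sp n => (sp.1 ++ [(trans.drop sp.2).take n], sp.2 + n))
            (([] : List (List String)), st.2)
          (st.1 ++ [r.1], r.2)) (acc, done.length)
      = (acc ++ seq.map (fun p => p.map (fun v => v.map f)),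
         done.length + (seq.flatMap (fun p => p.flatMap (fun v => v.map f))).length) := by
  induction seq generalizing acc done with
  | nil => simp
  | cons p seq ih =>
    simp only [List.map_cons, List.foldl_cons]
    have hrow := row_fold f trans p [] done
      (seq.flatMap (fun p => p.flatMap (fun v => v.map f)) ++ rest)
      (by rw [ht]; simp [List.append_assoc])
    rw [show (p.map (fun v : List String => v.length)) = (p.map List.length) from rfl, hrow]
    have hlen : done.length + (p.flatMap (fun v => v.map f)).length
        = (done ++ p.flatMap (fun v => v.map f)).length := by simp
    rw [hlen, ih (acc ++ [[] ++ p.map (fun v => v.map f)])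
          (done ++ p.flatMap (fun v => v.map f))
          (by rw [ht]; simp [List.append_assoc])]
    simp only [List.flatMap_cons, Prod.mk.injEq, List.nil_append]
    constructor
    · simp
    · simp; omega

-- ===== VERDICT (by name: the statement is the Claim_ definition above) =====
theorem get_cat_spec : Claim_equal_get_cat := by
  intro seq diag2cat proc2cat drug2cat _
  unfold Spec_get_cat get_cat get_cat_alt
  simp only [PySem.List.foldl_append_singleton_eq_map, List.nil_append]
  set f := fun c => bCategory c diag2cat proc2cat drug2cat with hf
  set flat := seq.flatMap (fun p => p.flatMap (fun v => v)) with hflat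
  set memo := flat.foldl (fun memo c =>
    if memo.contains c then memo else memo.insert c (f c)) PySem.Dict.empty with hmemo
  have hlook : flat.map (fun c => memo.getD c c) = flat.map f := by
    refine List.map_congr_left (fun c hc => ?_)
    have := memo_get f flat PySem.Dict.empty
      (by intro k v hk; simp [PySem.Dict.get?_empty] at hk) c (Or.inl hc)
    rw [hmemo] at *
    rw [PySem.Dict.getD_eq_get?_getD, this, Option.getD_some]
  rw [hlook, hflat]
  have htrans : (seq.flatMap (fun p => p.flatMap (fun v => v))).map f
      = [] ++ seq.flatMap (fun p => p.flatMap (fun v => v.map f)) ++ [] := by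
    simp only [List.map_flatMap, List.nil_append, List.append_nil]
  rw [htrans]
  have := outer_fold f ([] ++ seq.flatMap (fun p => p.flatMap (fun v => v.map f)) ++ [])
    seq [] [] []
    (by simp)
  rw [show (0 : Nat) = ([] : List String).length from rfl, this]
  have hpl : pyLookup3 diag2cat proc2cat drug2cat = f := rfl
  simp only [hpl, List.nil_append]
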